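-- pv_equiv track=rewrite | github.com/HeiniDebes/ZEKRA | scripts/compile_circuit.py | set_label_bitwidth
-- ===== SOURCE A (Python) =====
-- def count_leading_whitespace(string):
--     return len(string)-len(string.lstrip())
--
-- def set_label_bitwidth(contents, bitwidth):
--     for idx,line in enumerate(contents):
--         replace_line=None
--         if 'initialNode = new UnsignedInteger(' in line:
--             replace_line='%sinitialNode = new UnsignedInteger(%s, new BigInteger("0"));'
--         if 'initialNode = UnsignedInteger.createInput(this,' in line:
--             replace_line='%sinitialNode = UnsignedInteger.createInput(this, %s);'
--         if 'finalNode = new UnsignedInteger(' in line: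
--             replace_line='%sfinalNode = new UnsignedInteger(%s, new BigInteger("0"));'
--         if 'finalNode = UnsignedInteger.createInput(this,' in line:
--             replace_line='%sfinalNode = UnsignedInteger.createInput(this, %s);'
--         if 'TRANSLATION_HINTS = (UnsignedInteger[][]) UnsignedInteger.createZeroArray(CircuitGenerator.__getActiveCircuitGenerator(), new int[]{EXECUTION_PATH_SIZE, 2},' in line:
--             replace_line='%sTRANSLATION_HINTS = (UnsignedInteger[][]) UnsignedInteger.createZeroArray(CircuitGenerator.__getActiveCircuitGenerator(), new int[]{EXECUTION_PATH_SIZE, 2}, %s);'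
--         if 'TRANSLATION_HINTS = (UnsignedInteger[][]) UnsignedInteger.createWitnessArray(CircuitGenerator.__getActiveCircuitGenerator(), Util.getArrayDimensions(TRANSLATION_HINTS),' in line:
--             replace_line='%sTRANSLATION_HINTS = (UnsignedInteger[][]) UnsignedInteger.createWitnessArray(CircuitGenerator.__getActiveCircuitGenerator(), Util.getArrayDimensions(TRANSLATION_HINTS), %s);'
--         if 'dest = (UnsignedInteger[]) UnsignedInteger.createZeroArray(CircuitGenerator.__getActiveCircuitGenerator(), new int[]{EXECUTION_PATH_SIZE},' in line:
--             replace_line='%sdest = (UnsignedInteger[]) UnsignedInteger.createZeroArray(CircuitGenerator.__getActiveCircuitGenerator(), new int[]{EXECUTION_PATH_SIZE}, %s);'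
--         if 'dest = (UnsignedInteger[]) UnsignedInteger.createWitnessArray(CircuitGenerator.__getActiveCircuitGenerator(), Util.getArrayDimensions(dest),' in line:
--             replace_line='%sdest = (UnsignedInteger[]) UnsignedInteger.createWitnessArray(CircuitGenerator.__getActiveCircuitGenerator(), Util.getArrayDimensions(dest), %s);'
--         if 'UnsignedInteger state = initialNode.copy(' in line:
--             replace_line='%sUnsignedInteger state = initialNode.copy(%s);'
--         if 'state.assign(uintDestNode,' in line:
--             replace_line='%sstate.assign(uintDestNode, %s);'
--         if 'UnsignedInteger uintDestNode = dest[i].copy(' in line: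
--             replace_line='%sUnsignedInteger uintDestNode = dest[i].copy(%s);'
--         if 'UnsignedInteger bucket = uintDestNode.div(UnsignedInteger.instantiateFrom(4, 8)).copy(' in line:
--             replace_line='%sUnsignedInteger bucket = uintDestNode.div(UnsignedInteger.instantiateFrom(4, 8)).copy(%s);'
--         if 'CircuitGenerator.__getActiveCircuitGenerator().__addOneAssertion(shadowStackTop.isNotEqualTo(UnsignedInteger.instantiateFrom(' in line:
--             replace_line='%sCircuitGenerator.__getActiveCircuitGenerator().__addOneAssertion(shadowStackTop.isNotEqualTo(UnsignedInteger.instantiateFrom(%s, SHADOWSTACK_DEPTH)).getWire());'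
--         if replace_line:
--             contents[idx]=replace_line%(' '*count_leading_whitespace(line),bitwidth)
--     return contents
-- ===== SOURCE B (Python) =====
-- # Loop interchange: pattern-major staged passes fill a per-line template-choice
-- # array (later patterns overwrite earlier choices, preserving last-match-wins),
-- # then a single formatting pass rewrites the chosen lines.
-- _PATTERNS = [
--     ('initialNode = new UnsignedInteger(', '%sinitialNode = new UnsignedInteger(%s, new BigInteger("0"));'),
--     ('initialNode = UnsignedInteger.createInput(this,', '%sinitialNode = UnsignedInteger.createInput(this, %s);'),
--     ('finalNode = new UnsignedInteger(', '%sfinalNode = new UnsignedInteger(%s, new BigInteger("0"));'),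
--     ('finalNode = UnsignedInteger.createInput(this,', '%sfinalNode = UnsignedInteger.createInput(this, %s);'),
--     ('TRANSLATION_HINTS = (UnsignedInteger[][]) UnsignedInteger.createZeroArray(CircuitGenerator.__getActiveCircuitGenerator(), new int[]{EXECUTION_PATH_SIZE, 2},', '%sTRANSLATION_HINTS = (UnsignedInteger[][]) UnsignedInteger.createZeroArray(CircuitGenerator.__getActiveCircuitGenerator(), new int[]{EXECUTION_PATH_SIZE, 2}, %s);'),
--     ('TRANSLATION_HINTS = (UnsignedInteger[][]) UnsignedInteger.createWitnessArray(CircuitGenerator.__getActiveCircuitGenerator(), Util.getArrayDimensions(TRANSLATION_HINTS),', '%sTRANSLATION_HINTS = (UnsignedInteger[][]) UnsignedInteger.createWitnessArray(CircuitGenerator.__getActiveCircuitGenerator(), Util.getArrayDimensions(TRANSLATION_HINTS), %s);'),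
--     ('dest = (UnsignedInteger[]) UnsignedInteger.createZeroArray(CircuitGenerator.__getActiveCircuitGenerator(), new int[]{EXECUTION_PATH_SIZE},', '%sdest = (UnsignedInteger[]) UnsignedInteger.createZeroArray(CircuitGenerator.__getActiveCircuitGenerator(), new int[]{EXECUTION_PATH_SIZE}, %s);'),
--     ('dest = (UnsignedInteger[]) UnsignedInteger.createWitnessArray(CircuitGenerator.__getActiveCircuitGenerator(), Util.getArrayDimensions(dest),', '%sdest = (UnsignedInteger[]) UnsignedInteger.createWitnessArray(CircuitGenerator.__getActiveCircuitGenerator(), Util.getArrayDimensions(dest), %s);'),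
--     ('UnsignedInteger state = initialNode.copy(', '%sUnsignedInteger state = initialNode.copy(%s);'),
--     ('state.assign(uintDestNode,', '%sstate.assign(uintDestNode, %s);'),
--     ('UnsignedInteger uintDestNode = dest[i].copy(', '%sUnsignedInteger uintDestNode = dest[i].copy(%s);'),
--     ('UnsignedInteger bucket = uintDestNode.div(UnsignedInteger.instantiateFrom(4, 8)).copy(', '%sUnsignedInteger bucket = uintDestNode.div(UnsignedInteger.instantiateFrom(4, 8)).copy(%s);'),
--     ('CircuitGenerator.__getActiveCircuitGenerator().__addOneAssertion(shadowStackTop.isNotEqualTo(UnsignedInteger.instantiateFrom(', '%sCircuitGenerator.__getActiveCircuitGenerator().__addOneAssertion(shadowStackTop.isNotEqualTo(UnsignedInteger.instantiateFrom(%s, SHADOWSTACK_DEPTH)).getWire());'),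
-- ]
--
-- def set_label_bitwidth(contents, bitwidth):
--     lines = list(contents)
--     choices = [None] * len(lines)
--     # phase 1: pattern-major passes; a later pattern overwrites the choice
--     for sub, tpl in _PATTERNS:
--         for i, line in enumerate(lines):
--             if sub in line:
--                 choices[i] = tpl
--     # phase 2: format the chosen lines
--     for i, (line, tpl) in enumerate(zip(lines, choices)):
--         if tpl is not None:
--             contents[i] = tpl % (' ' * (len(line) - len(line.lstrip())), bitwidth)
--     return contents
-- ===== Notes on version B (the rewrite author's own statement) =====
-- stated objective: alternative
-- what changed: Interchanges the loops: instead of A's line-major pass with a 13-branch if chain per line, B makes one pass per pattern over all lines filling a per-line template-choice array (later passes overwrite, preserving last-match-wins), then a separate single formatting pass rewrites the chosen lines.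
import Mathlib
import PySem

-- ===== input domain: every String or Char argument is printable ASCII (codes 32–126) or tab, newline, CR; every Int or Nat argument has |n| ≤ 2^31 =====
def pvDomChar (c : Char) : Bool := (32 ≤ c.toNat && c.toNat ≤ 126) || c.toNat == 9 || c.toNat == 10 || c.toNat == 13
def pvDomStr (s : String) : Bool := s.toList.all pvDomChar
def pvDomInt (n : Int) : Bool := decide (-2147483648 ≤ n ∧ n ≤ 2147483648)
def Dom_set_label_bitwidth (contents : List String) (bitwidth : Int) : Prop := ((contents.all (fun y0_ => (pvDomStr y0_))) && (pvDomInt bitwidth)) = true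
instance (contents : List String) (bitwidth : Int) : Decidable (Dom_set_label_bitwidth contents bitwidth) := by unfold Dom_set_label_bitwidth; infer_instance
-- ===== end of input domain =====

-- ===== PORT A =====
-- Python '%'-formatting for a template holding exactly the %s directives consumed by the given
-- arguments (exact for every template the two programs use: each has exactly two %s and no other %).
def pyFmtChars : List Char → List String → List Char
  | '%' :: 's' :: rest, a :: args => a.toList ++ pyFmtChars rest args
  | c :: rest, args => c :: pyFmtChars rest args
  | [], _ => []

def pyFmt2 (tpl a b : String) : String := String.mk (pyFmtChars tpl.toList [a, b])

def count_leading_whitespace (string : String) : Int :=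
  (PySem.Str.len string : Int) - (PySem.Str.len (PySem.Str.lstrip string) : Int)

-- the body of A's for-loop (idx,line = p; the 13 sequential non-elif ifs, then the guarded assignment)
def aBody (bitwidth : Int) (acc : List String) (p : Int × String) : List String :=
  let idx := p.1
  let line := p.2
  let replace_line : Option String := none
  let replace_line := if PySem.Str.isIn "initialNode = new UnsignedInteger(" line then some "%sinitialNode = new UnsignedInteger(%s, new BigInteger(\"0\"));" else replace_line
  let replace_line := if PySem.Str.isIn "initialNode = UnsignedInteger.createInput(this," line then some "%sinitialNode = UnsignedInteger.createInput(this, %s);" else replace_line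
  let replace_line := if PySem.Str.isIn "finalNode = new UnsignedInteger(" line then some "%sfinalNode = new UnsignedInteger(%s, new BigInteger(\"0\"));" else replace_line
  let replace_line := if PySem.Str.isIn "finalNode = UnsignedInteger.createInput(this," line then some "%sfinalNode = UnsignedInteger.createInput(this, %s);" else replace_line
  let replace_line := if PySem.Str.isIn "TRANSLATION_HINTS = (UnsignedInteger[][]) UnsignedInteger.createZeroArray(CircuitGenerator.__getActiveCircuitGenerator(), new int[]{EXECUTION_PATH_SIZE, 2}," line then some "%sTRANSLATION_HINTS = (UnsignedInteger[][]) UnsignedInteger.createZeroArray(CircuitGenerator.__getActiveCircuitGenerator(), new int[]{EXECUTION_PATH_SIZE, 2}, %s);" else replace_line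
  let replace_line := if PySem.Str.isIn "TRANSLATION_HINTS = (UnsignedInteger[][]) UnsignedInteger.createWitnessArray(CircuitGenerator.__getActiveCircuitGenerator(), Util.getArrayDimensions(TRANSLATION_HINTS)," line then some "%sTRANSLATION_HINTS = (UnsignedInteger[][]) UnsignedInteger.createWitnessArray(CircuitGenerator.__getActiveCircuitGenerator(), Util.getArrayDimensions(TRANSLATION_HINTS), %s);" else replace_line
  let replace_line := if PySem.Str.isIn "dest = (UnsignedInteger[]) UnsignedInteger.createZeroArray(CircuitGenerator.__getActiveCircuitGenerator(), new int[]{EXECUTION_PATH_SIZE}," line then some "%sdest = (UnsignedInteger[]) UnsignedInteger.createZeroArray(CircuitGenerator.__getActiveCircuitGenerator(), new int[]{EXECUTION_PATH_SIZE}, %s);" else replace_line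
  let replace_line := if PySem.Str.isIn "dest = (UnsignedInteger[]) UnsignedInteger.createWitnessArray(CircuitGenerator.__getActiveCircuitGenerator(), Util.getArrayDimensions(dest)," line then some "%sdest = (UnsignedInteger[]) UnsignedInteger.createWitnessArray(CircuitGenerator.__getActiveCircuitGenerator(), Util.getArrayDimensions(dest), %s);" else replace_line
  let replace_line := if PySem.Str.isIn "UnsignedInteger state = initialNode.copy(" line then some "%sUnsignedInteger state = initialNode.copy(%s);" else replace_line
  let replace_line := if PySem.Str.isIn "state.assign(uintDestNode," line then some "%sstate.assign(uintDestNode, %s);" else replace_line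
  let replace_line := if PySem.Str.isIn "UnsignedInteger uintDestNode = dest[i].copy(" line then some "%sUnsignedInteger uintDestNode = dest[i].copy(%s);" else replace_line
  let replace_line := if PySem.Str.isIn "UnsignedInteger bucket = uintDestNode.div(UnsignedInteger.instantiateFrom(4, 8)).copy(" line then some "%sUnsignedInteger bucket = uintDestNode.div(UnsignedInteger.instantiateFrom(4, 8)).copy(%s);" else replace_line
  let replace_line := if PySem.Str.isIn "CircuitGenerator.__getActiveCircuitGenerator().__addOneAssertion(shadowStackTop.isNotEqualTo(UnsignedInteger.instantiateFrom(" line then some "%sCircuitGenerator.__getActiveCircuitGenerator().__addOneAssertion(shadowStackTop.isNotEqualTo(UnsignedInteger.instantiateFrom(%s, SHADOWSTACK_DEPTH)).getWire());" else replace_line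
  match replace_line with
  | some tpl =>
      -- contents[idx] = replace_line % (' '*count_leading_whitespace(line), bitwidth)
      acc.set idx.toNat (pyFmt2 tpl (String.mk (List.replicate (count_leading_whitespace line).toNat ' ')) (PySem.Int.toStr bitwidth))
  | none => acc

def set_label_bitwidth (contents : List String) (bitwidth : Int) : List String :=
  (PySem.List.enumerate contents 0).foldl (aBody bitwidth) contents

-- ===== PORT B =====
-- B interchanges the loops: one pass per pattern fills a per-line template-choice array
-- (later passes overwrite, preserving last-match-wins), then a separate formatting pass.
-- Both Pythons mutate `contents` in place; the equivalence proved is about the return value.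
def pvPatterns : List (String × String) :=
  [
    ("initialNode = new UnsignedInteger(", "%sinitialNode = new UnsignedInteger(%s, new BigInteger(\"0\"));"),
    ("initialNode = UnsignedInteger.createInput(this,", "%sinitialNode = UnsignedInteger.createInput(this, %s);"),
    ("finalNode = new UnsignedInteger(", "%sfinalNode = new UnsignedInteger(%s, new BigInteger(\"0\"));"),
    ("finalNode = UnsignedInteger.createInput(this,", "%sfinalNode = UnsignedInteger.createInput(this, %s);"),
    ("TRANSLATION_HINTS = (UnsignedInteger[][]) UnsignedInteger.createZeroArray(CircuitGenerator.__getActiveCircuitGenerator(), new int[]{EXECUTION_PATH_SIZE, 2},", "%sTRANSLATION_HINTS = (UnsignedInteger[][]) UnsignedInteger.createZeroArray(CircuitGenerator.__getActiveCircuitGenerator(), new int[]{EXECUTION_PATH_SIZE, 2}, %s);"),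
    ("TRANSLATION_HINTS = (UnsignedInteger[][]) UnsignedInteger.createWitnessArray(CircuitGenerator.__getActiveCircuitGenerator(), Util.getArrayDimensions(TRANSLATION_HINTS),", "%sTRANSLATION_HINTS = (UnsignedInteger[][]) UnsignedInteger.createWitnessArray(CircuitGenerator.__getActiveCircuitGenerator(), Util.getArrayDimensions(TRANSLATION_HINTS), %s);"),
    ("dest = (UnsignedInteger[]) UnsignedInteger.createZeroArray(CircuitGenerator.__getActiveCircuitGenerator(), new int[]{EXECUTION_PATH_SIZE},", "%sdest = (UnsignedInteger[]) UnsignedInteger.createZeroArray(CircuitGenerator.__getActiveCircuitGenerator(), new int[]{EXECUTION_PATH_SIZE}, %s);"),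
    ("dest = (UnsignedInteger[]) UnsignedInteger.createWitnessArray(CircuitGenerator.__getActiveCircuitGenerator(), Util.getArrayDimensions(dest),", "%sdest = (UnsignedInteger[]) UnsignedInteger.createWitnessArray(CircuitGenerator.__getActiveCircuitGenerator(), Util.getArrayDimensions(dest), %s);"),
    ("UnsignedInteger state = initialNode.copy(", "%sUnsignedInteger state = initialNode.copy(%s);"),
    ("state.assign(uintDestNode,", "%sstate.assign(uintDestNode, %s);"),
    ("UnsignedInteger uintDestNode = dest[i].copy(", "%sUnsignedInteger uintDestNode = dest[i].copy(%s);"),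
    ("UnsignedInteger bucket = uintDestNode.div(UnsignedInteger.instantiateFrom(4, 8)).copy(", "%sUnsignedInteger bucket = uintDestNode.div(UnsignedInteger.instantiateFrom(4, 8)).copy(%s);"),
    ("CircuitGenerator.__getActiveCircuitGenerator().__addOneAssertion(shadowStackTop.isNotEqualTo(UnsignedInteger.instantiateFrom(", "%sCircuitGenerator.__getActiveCircuitGenerator().__addOneAssertion(shadowStackTop.isNotEqualTo(UnsignedInteger.instantiateFrom(%s, SHADOWSTACK_DEPTH)).getWire());") ]

-- phase 1: pattern-major passes over the per-line choice array (choices[i]=tpl when sub in lines[i])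
def pvChoices (lines : List String) : List (Option String) :=
  pvPatterns.foldl
    (fun ch p => List.zipWith (fun c line => if PySem.Str.isIn p.1 line then some p.2 else c) ch lines)
    (List.replicate lines.length (none : Option String))

-- phase 2 loop body: contents[i] = tpl % (' '*(len(line)-len(line.lstrip())), bitwidth) when a template was chosen
def altStep (bitwidth : Int) (acc : List String) (q : Int × String × Option String) : List String :=
  match q.2.2 with
  | some tpl =>
      acc.set q.1.toNat
        (pyFmt2 tpl
          (String.mk (List.replicate (PySem.Str.len q.2.1 - PySem.Str.len (PySem.Str.lstrip q.2.1)).toNat ' '))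
          (PySem.Int.toStr bitwidth))
  | none => acc

def set_label_bitwidth_alt (contents : List String) (bitwidth : Int) : List String :=
  (PySem.List.enumerate (contents.zip (pvChoices contents)) 0).foldl (altStep bitwidth) contents

-- ===== PRECONDITION & SPEC =====
def Spec_set_label_bitwidth (contents : List String) (bitwidth : Int) (out : List String) : Prop := out = set_label_bitwidth_alt contents bitwidth
instance (contents : List String) (bitwidth : Int) (out : List String) : Decidable (Spec_set_label_bitwidth contents bitwidth out) := by unfold Spec_set_label_bitwidth; infer_instance

-- ===== CLAIM (what is proved, stated in full; the proofs are below) =====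
def Claim_equal_set_label_bitwidth : Prop := ∀ (contents : List String) (bitwidth : Int), Dom_set_label_bitwidth contents bitwidth → Spec_set_label_bitwidth contents bitwidth (set_label_bitwidth contents bitwidth)

-- ===== LEMMAS AND PROOFS =====

-- the per-line last-matching template (the common denotation both programs compute)
def lastTpl (line : String) : Option String :=
  pvPatterns.foldl (fun c q => if PySem.Str.isIn q.1 line then some q.2 else c) none

def fmtAt (bw : Int) (line : String) : Option String → String
  | some tpl =>
      pyFmt2 tpl (String.mk (List.replicate (count_leading_whitespace line).toNat ' ')) (PySem.Int.toStr bw)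
  | none => line

-- A's 13 sequential ifs ARE the fold of the pattern table (definitional)
theorem astep_eq (bitwidth : Int) (acc : List String) (i : Int) (line : String) :
    aBody bitwidth acc (i, line)
      = match lastTpl line with
        | some tpl => acc.set i.toNat (pyFmt2 tpl (String.mk (List.replicate (count_leading_whitespace line).toNat ' ')) (PySem.Int.toStr bitwidth))
        | none => acc := rfl

-- loop interchange: pattern-major zipWith passes compute the line-major per-line fold
theorem interchange {P L B : Type} (f : P → Option B → L → Option B) :
    ∀ (ps : List P) (lines : List L) (g : L → Option B),
      ps.foldl (fun ch p => List.zipWith (fun c l => f p c l) ch lines) (lines.map g)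
        = lines.map (fun l => ps.foldl (fun c p => f p c l) (g l)) := by
  intro ps
  induction ps with
  | nil => intro lines g; simp
  | cons p rest ih =>
      intro lines g
      have hz : ∀ (ls : List L), List.zipWith (fun c l => f p c l) (ls.map g) ls
          = ls.map (fun l => f p (g l) l) := by
        intro ls
        induction ls with
        | nil => rfl
        | cons a t iht => simp [iht]
      simp only [List.foldl_cons, hz, ih lines (fun l => f p (g l) l)]

theorem choices_eq (lines : List String) : pvChoices lines = lines.map lastTpl := by
  unfold pvChoices
  have hrep : List.replicate lines.length (none : Option String)
      = lines.map (fun _ => (none : Option String)) := by simp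
  rw [hrep,
    interchange (fun p c l => if PySem.Str.isIn p.1 l then some p.2 else c) pvPatterns lines
      (fun _ => none)]
  rfl

-- phase 2 of B maps fmtAt over the line/choice pairs
theorem phase2 (bw : Int) :
    ∀ (lz : List (String × Option String)) (pre : List String),
      (PySem.List.enumerate lz (pre.length : Int)).foldl (altStep bw) (pre ++ lz.map (·.1))
      = pre ++ lz.map (fun q => fmtAt bw q.1 q.2) := by
  intro lz
  induction lz with
  | nil => intro pre; simp [PySem.List.enumerate]
  | cons x rest ih =>
      intro pre
      obtain ⟨xl, xo⟩ := x
      have hstep : altStep bw (pre ++ ((xl, xo) :: rest).map (·.1)) ((pre.length : Int), xl, xo)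
          = (pre ++ [fmtAt bw xl xo]) ++ rest.map (·.1) := by
        rcases hx : xo with _ | tpl
        · simp [altStep, fmtAt]
        · simp [altStep, fmtAt, count_leading_whitespace]
      have hl : ((pre.length : Int) + 1) = (((pre ++ [fmtAt bw xl xo]).length : Int)) := by simp
      rw [PySem.List.enumerate_cons, List.foldl_cons, hstep, hl,
        ih (pre ++ [fmtAt bw xl xo])]
      simp

-- A's line-major pass computes the same per-line denotation
theorem main_aux (bitwidth : Int) :
    ∀ (todo pre : List String),
      (PySem.List.enumerate todo (pre.length : Int)).foldl (aBody bitwidth) (pre ++ todo)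
      = pre ++ todo.map (fun l => fmtAt bitwidth l (lastTpl l)) := by
  intro todo
  induction todo with
  | nil => intro pre; simp [PySem.List.enumerate]
  | cons x rest ih =>
      intro pre
      have hstep : aBody bitwidth (pre ++ x :: rest) ((pre.length : Int), x)
          = (pre ++ [fmtAt bitwidth x (lastTpl x)]) ++ rest := by
        rw [astep_eq]
        rcases h : lastTpl x with _ | tpl
        · simp [fmtAt]
        · simp [fmtAt]
      have hl : ((pre.length : Int) + 1) = (((pre ++ [fmtAt bitwidth x (lastTpl x)]).length : Int)) := by simp
      rw [PySem.List.enumerate_cons, List.foldl_cons, hstep, hl,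
        ih (pre ++ [fmtAt bitwidth x (lastTpl x)])]
      simp

theorem alt_eq_map (contents : List String) (bitwidth : Int) :
    set_label_bitwidth_alt contents bitwidth
      = contents.map (fun l => fmtAt bitwidth l (lastTpl l)) := by
  unfold set_label_bitwidth_alt
  rw [choices_eq]
  have hzip : ∀ (ls : List String), ls.zip (ls.map lastTpl) = ls.map (fun l => (l, lastTpl l)) := by
    intro ls
    induction ls with
    | nil => rfl
    | cons a t iht => simp [iht]
  rw [hzip contents]
  have h := phase2 bitwidth (contents.map (fun l => (l, lastTpl l))) []
  simpa [Function.comp_def] using h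

-- ===== VERDICT (by name: the statement is the Claim_ definition above) =====
theorem set_label_bitwidth_spec : Claim_equal_set_label_bitwidth := by
  intro contents bitwidth _
  show set_label_bitwidth contents bitwidth = set_label_bitwidth_alt contents bitwidth
  rw [alt_eq_map]
  have h := main_aux bitwidth contents []
  simpa [set_label_bitwidth] using h
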